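-- pv_equiv track=rewrite | github.com/mikudehuane/ICIIA | code/dataset/imagenet.py | get_user_split
-- ===== SOURCE A (Python) =====
-- from collections import OrderedDict
-- from copy import deepcopy
-- from typing import Tuple, List, Dict
-- import typing
--
-- def get_user_split(
--         user_indices_train_val: typing.OrderedDict[int, List[int]],
--         user_indices_test: typing.OrderedDict[int, List[int]]
-- ) -> Tuple[typing.OrderedDict[str, List[int]], typing.OrderedDict[str, List[int]]]:
--     assert len(user_indices_train_val) == len(user_indices_test), 'train_val and test should have same number of users'
--
--     user_indices_train_val = deepcopy(user_indices_train_val)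
--     user_indices_test = deepcopy(user_indices_test)
--
--     num_train_mult = 80
--     num_test_mult = 16
--
--     new_user_indices_train_val = OrderedDict()
--     new_user_indices_test = OrderedDict()
--
--     cls_format = '{:0' + str(len(str(len(user_indices_train_val)))) + 'd}'  # 父类 ID 的格式
--     key_format = cls_format + '-{:05d}'  # 不会超过五位
--
--     for (user_index_tv_key, user_index_tv), (user_index_test_key, user_index_test) in zip(
--             user_indices_train_val.items(), user_indices_test.items()):
--         assert user_index_tv_key == user_index_test_key, 'train_val and test should have same user index'
--         # know the number of groups
--         num_groups_tv = (len(user_index_tv) + num_train_mult - 1) // num_train_mult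
--         num_groups_test = (len(user_index_test) + num_test_mult - 1) // num_test_mult
--
--         # "large" for the dataset with more *groups*
--         if num_groups_tv > num_groups_test:
--             new_user_indices_small = new_user_indices_test
--             new_user_indices_large = new_user_indices_train_val
--             num_groups_small = num_groups_test
--             num_groups_large = num_groups_tv
--             num_mult_large = num_train_mult
--             num_mult_small = num_test_mult
--             user_index_large = user_index_tv
--             user_index_small = user_index_test
--         else:
--             new_user_indices_small = new_user_indices_train_val
--             new_user_indices_large = new_user_indices_test
--             num_groups_small = num_groups_tv
--             num_groups_large = num_groups_test
--             num_mult_large = num_test_mult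
--             num_mult_small = num_train_mult
--             user_index_large = user_index_test
--             user_index_small = user_index_tv
--
--         # tv/test, choose the min as the base
--         for sub_user_idx in range(num_groups_small):
--             large_range_min = (num_groups_large * sub_user_idx) // num_groups_small
--             large_range_max = (num_groups_large * (sub_user_idx + 1)) // num_groups_small
--             assert large_range_max > large_range_min, 'large_range_max should be larger than large_range_min'
--             large_range_min = large_range_min * num_mult_large
--             large_range_max = large_range_max * num_mult_large
--             key = key_format.format(user_index_tv_key, sub_user_idx)
--             new_user_indices_large[key] = user_index_large[large_range_min: large_range_max]
--             key = key_format.format(user_index_test_key, sub_user_idx)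
--             new_user_indices_small[key] = user_index_small[sub_user_idx * num_mult_small:
--                                                            (sub_user_idx + 1) * num_mult_small]
--
--     return new_user_indices_train_val, new_user_indices_test
-- ===== SOURCE B (Python) =====
-- from collections import OrderedDict
--
--
-- def _regroup(chunks, n):
--     # scatter pass: chunk j of g goes to output group (n*(j+1)-1)//g;
--     # buckets are non-decreasing, start at 0 and end at n-1, so one pass
--     # with a flush-on-bucket-change accumulator yields the n groups in order.
--     g = len(chunks)
--     groups = []
--     cur = []
--     cur_b = 0
--     for j, chunk in enumerate(chunks):
--         b = (n * (j + 1) - 1) // g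
--         if b != cur_b:
--             groups.append(cur)
--             cur = chunk
--             cur_b = b
--         else:
--             cur = cur + chunk
--     groups.append(cur)
--     return groups
--
--
-- def get_user_split(user_indices_train_val, user_indices_test):
--     assert len(user_indices_train_val) == len(user_indices_test), \
--         'train_val and test should have same number of users'
--
--     cls_format = '{:0' + str(len(str(len(user_indices_train_val)))) + 'd}'
--     key_format = cls_format + '-{:05d}'
--
--     new_user_indices_train_val = OrderedDict()
--     new_user_indices_test = OrderedDict()
--
--     for (key_tv, index_tv), (key_test, index_test) in zip(
--             user_indices_train_val.items(), user_indices_test.items()):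
--         assert key_tv == key_test, 'train_val and test should have same user index'
--         num_groups_tv = (len(index_tv) + 79) // 80
--         num_groups_test = (len(index_test) + 15) // 16
--         n = min(num_groups_tv, num_groups_test)
--         if n != 0:
--             chunks_tv = [index_tv[j * 80:(j + 1) * 80] for j in range(num_groups_tv)]
--             chunks_test = [index_test[j * 16:(j + 1) * 16] for j in range(num_groups_test)]
--             for i, (grp_tv, grp_test) in enumerate(zip(_regroup(chunks_tv, n),
--                                                        _regroup(chunks_test, n))):
--                 key = key_format.format(key_tv, i)
--                 new_user_indices_train_val[key] = grp_tv
--                 new_user_indices_test[key] = grp_test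
--
--     return new_user_indices_train_val, new_user_indices_test
-- ===== Notes on version B (the rewrite author's own statement) =====
-- stated objective: alternative
-- what changed: B inverts A's gather strategy: instead of computing, per output index, stretched slice boundaries (with a large/small aliasing swap), B chunks each list into fixed 80/16-size blocks once and scatters them in a single flush-on-bucket-change sweep, sending block j to output group (n*(j+1)-1)//g, where n = min of the two block counts.
import Mathlib
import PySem

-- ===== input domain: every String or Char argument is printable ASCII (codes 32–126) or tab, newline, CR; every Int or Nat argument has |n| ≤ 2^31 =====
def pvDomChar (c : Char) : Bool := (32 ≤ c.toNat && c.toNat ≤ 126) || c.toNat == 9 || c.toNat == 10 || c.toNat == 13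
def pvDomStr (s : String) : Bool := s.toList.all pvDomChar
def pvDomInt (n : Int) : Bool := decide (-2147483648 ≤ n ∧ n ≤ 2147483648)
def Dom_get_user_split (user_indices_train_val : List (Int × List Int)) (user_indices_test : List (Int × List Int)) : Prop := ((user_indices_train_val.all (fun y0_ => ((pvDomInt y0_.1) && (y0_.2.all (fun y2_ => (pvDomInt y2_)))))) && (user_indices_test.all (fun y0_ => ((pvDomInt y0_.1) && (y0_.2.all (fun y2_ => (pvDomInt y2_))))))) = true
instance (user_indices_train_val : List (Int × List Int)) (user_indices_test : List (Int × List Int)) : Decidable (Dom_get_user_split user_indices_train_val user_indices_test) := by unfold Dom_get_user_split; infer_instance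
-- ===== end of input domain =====

-- B replaces A's per-output-group gather slicing (with its large/small aliasing swap) by a
-- scatter pass: chunk both lists into fixed-size blocks once, then assign each block j to
-- output group (n*(j+1)-1)//g in a single flush-on-bucket-change sweep (objective: alternative).
-- Return-value equivalence only: A deepcopies its arguments; neither program mutates them observably.

-- '{:0Wd}'.format(n): zero-pad str(n) to width W, the zeros after the sign (exact for any int)
def pyZeroPad (width : Nat) (n : Int) : List Char :=
  let s := PySem.Int.toChars n
  if n < 0 then '-' :: (List.replicate (width - s.length) '0' ++ s.drop 1)
  else List.replicate (width - s.length) '0' ++ s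

-- key_format.format(k, i) with cls width `w`: '{:0wd}-{:05d}'
def mkKey (w : Nat) (k i : Int) : String :=
  String.ofList (pyZeroPad w k ++ ('-' :: pyZeroPad 5 i))

-- ===== PORT A =====
-- The first two asserts hold exactly on Pre_ (excluded otherwise); the inner
-- 'large_range_max > large_range_min' always holds (#groups_large ≥ #groups_small > 0).
-- Dict writes are appends: inside Pre_ every written key is fresh (user keys are distinct, mkKey injective per width).
def get_user_split (user_indices_train_val : List (Int × List Int)) (user_indices_test : List (Int × List Int)) : (List (String × List Int)) × (List (String × List Int)) :=
  let w := (PySem.Int.toChars (user_indices_train_val.length : Int)).length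
  (user_indices_train_val.zip user_indices_test).foldl (fun acc p =>
    let ktv := p.1.1; let idx_tv := p.1.2
    let kte := p.2.1; let idx_te := p.2.2
    let gtv := PySem.Int.floordiv ((idx_tv.length : Int) + 80 - 1) 80
    let gte := PySem.Int.floordiv ((idx_te.length : Int) + 16 - 1) 16
    if gtv > gte then
      -- large = train_val, small = test
      (PySem.List.pyRange 0 gte 1).foldl (fun q i =>
        let lmin := PySem.Int.floordiv (gtv * i) gte * 80
        let lmax := PySem.Int.floordiv (gtv * (i + 1)) gte * 80
        (q.1 ++ [(mkKey w ktv i, PySem.List.slice idx_tv (some lmin) (some lmax))],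
         q.2 ++ [(mkKey w kte i, PySem.List.slice idx_te (some (i * 16)) (some ((i + 1) * 16)))])) acc
    else
      -- large = test, small = train_val (A keys large with the tv key, small with the test key)
      (PySem.List.pyRange 0 gtv 1).foldl (fun q i =>
        let lmin := PySem.Int.floordiv (gte * i) gtv * 16
        let lmax := PySem.Int.floordiv (gte * (i + 1)) gtv * 16
        (q.1 ++ [(mkKey w kte i, PySem.List.slice idx_tv (some (i * 80)) (some ((i + 1) * 80)))],
         q.2 ++ [(mkKey w ktv i, PySem.List.slice idx_te (some lmin) (some lmax))])) acc)
    ([], [])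

-- ===== PORT B =====
-- _regroup: one pass over the enumerated chunk list with state (groups, cur, cur_b),
-- flushing the accumulator whenever the bucket (n*(j+1)-1)//g changes.
def pvRegroup (chunks : List (List Int)) (n : Int) : List (List Int) :=
  let g : Int := (chunks.length : Int)
  let st := (PySem.List.enumerate chunks).foldl (fun st p =>
    let b := PySem.Int.floordiv (n * (p.1 + 1) - 1) g
    if b ≠ st.2.2 then (st.1 ++ [st.2.1], p.2, b) else (st.1, st.2.1 ++ p.2, st.2.2))
    (([] : List (List Int)), ([] : List Int), (0 : Int))
  st.1 ++ [st.2.1]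

def get_user_split_alt (user_indices_train_val : List (Int × List Int)) (user_indices_test : List (Int × List Int)) : (List (String × List Int)) × (List (String × List Int)) :=
  let w := (PySem.Int.toChars (user_indices_train_val.length : Int)).length
  (user_indices_train_val.zip user_indices_test).foldl (fun acc p =>
    let gtv := PySem.Int.floordiv ((p.1.2.length : Int) + 79) 80
    let gte := PySem.Int.floordiv ((p.2.2.length : Int) + 15) 16
    let n := min gtv gte
    if n ≠ 0 then
      let ctv := (PySem.List.pyRange 0 gtv 1).map (fun j => PySem.List.slice p.1.2 (some (j * 80)) (some ((j + 1) * 80)))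
      let cte := (PySem.List.pyRange 0 gte 1).map (fun j => PySem.List.slice p.2.2 (some (j * 16)) (some ((j + 1) * 16)))
      (PySem.List.enumerate ((pvRegroup ctv n).zip (pvRegroup cte n))).foldl (fun q ip =>
        (q.1 ++ [(mkKey w p.1.1 ip.1, ip.2.1)], q.2 ++ [(mkKey w p.1.1 ip.1, ip.2.2)])) acc
    else acc) ([], [])

-- ===== PRECONDITION & SPEC =====
-- Pre_ excludes inputs on which A's asserts raise AssertionError (different numbers of users,
-- mismatched user keys) and association lists with duplicate user keys, which cannot arise
-- from a Python dict argument (the dict collapses them before either program runs).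
def Pre_get_user_split (user_indices_train_val : List (Int × List Int)) (user_indices_test : List (Int × List Int)) : Prop :=
  user_indices_train_val.length = user_indices_test.length ∧
  (∀ p ∈ user_indices_train_val.zip user_indices_test, p.1.1 = p.2.1) ∧
  (user_indices_train_val.map Prod.fst).Nodup
instance (user_indices_train_val : List (Int × List Int)) (user_indices_test : List (Int × List Int)) : Decidable (Pre_get_user_split user_indices_train_val user_indices_test) := by unfold Pre_get_user_split; infer_instance

def pvWitness_get_user_split : (List (Int × List Int)) × (List (Int × List Int)) :=
  ([(1, [5, 6]), (2, [])], [(1, [7]), (2, [8])])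

def Spec_get_user_split (user_indices_train_val : List (Int × List Int)) (user_indices_test : List (Int × List Int)) (out : (List (String × List Int)) × (List (String × List Int))) : Prop := out = get_user_split_alt user_indices_train_val user_indices_test
instance (user_indices_train_val : List (Int × List Int)) (user_indices_test : List (Int × List Int)) (out : (List (String × List Int)) × (List (String × List Int))) : Decidable (Spec_get_user_split user_indices_train_val user_indices_test out) := by unfold Spec_get_user_split; infer_instance

-- ===== CLAIM (what is proved, stated in full; the proofs are below) =====
def Claim_equal_get_user_split : Prop := ∀ (user_indices_train_val : List (Int × List Int)) (user_indices_test : List (Int × List Int)), Dom_get_user_split user_indices_train_val user_indices_test → Pre_get_user_split user_indices_train_val user_indices_test → Spec_get_user_split user_indices_train_val user_indices_test (get_user_split user_indices_train_val user_indices_test)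

-- ===== LEMMAS AND PROOFS =====

-- A's group-i lower chunk boundary, and B's bucket of chunk j
def pvLo (g n i : Int) : Int := PySem.Int.floordiv (g * i) n
def pvB (g n j : Int) : Int := PySem.Int.floordiv (n * (j + 1) - 1) g
-- the i-th output group as B builds it: the concatenation of the chunks in bucket i
def pvGrp (g n : Int) (c : Int → List Int) (i : Int) : List Int :=
  ((PySem.List.pyRange (pvLo g n i) (pvLo g n (i + 1)) 1).map c).flatten

lemma pvLo_nonneg (g n i : Int) (hn : 0 < n) (hg : 0 ≤ g) (hi : 0 ≤ i) : 0 ≤ pvLo g n i := by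
  unfold pvLo
  rw [PySem.Int.le_floordiv_iff_mul_le hn]
  nlinarith

lemma pvLo_mul_le (g n i : Int) (hn : 0 < n) : pvLo g n i * n ≤ g * i :=
  (PySem.Int.le_floordiv_iff_mul_le hn).mp le_rfl

lemma pvLo_mono (g n : Int) (hn : 0 < n) (hg : 0 ≤ g) {i i' : Int} (h : i ≤ i') :
    pvLo g n i ≤ pvLo g n i' := by
  unfold pvLo
  rw [PySem.Int.le_floordiv_iff_mul_le hn]
  have := pvLo_mul_le g n i hn
  unfold pvLo at this
  nlinarith

lemma pvLo_zero (g n : Int) (hn : 0 < n) : pvLo g n 0 = 0 := by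
  unfold pvLo
  rw [PySem.Int.floordiv_eq_iff_of_pos hn]
  constructor <;> nlinarith

lemma pvLo_top (g n : Int) (hn : 0 < n) : pvLo g n n = g := by
  unfold pvLo
  rw [PySem.Int.floordiv_eq_iff_of_pos hn]
  constructor <;> nlinarith

lemma floordiv_mul_self (S i : Int) (hS : 0 < S) (_hi : 0 ≤ i) :
    PySem.Int.floordiv (S * i) S = i := by
  rw [PySem.Int.floordiv_eq_iff_of_pos hS]
  constructor <;> nlinarith

-- bucket characterization: chunk j lies in output group i iff lo i ≤ j < lo (i+1)
lemma pvB_eq_iff (g n i j : Int) (hn : 0 < n) (hg : 0 < g) :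
    pvB g n j = i ↔ pvLo g n i ≤ j ∧ j < pvLo g n (i + 1) := by
  unfold pvB pvLo
  rw [PySem.Int.floordiv_eq_iff_of_pos hg]
  have h1 : PySem.Int.floordiv (g * i) n ≤ j ↔ ¬ (j + 1 ≤ PySem.Int.floordiv (g * i) n) := by omega
  have h2 : (j + 1 ≤ PySem.Int.floordiv (g * i) n) ↔ (j + 1) * n ≤ g * i :=
    PySem.Int.le_floordiv_iff_mul_le hn
  have h3 : (j < PySem.Int.floordiv (g * (i + 1)) n) ↔ (j + 1 ≤ PySem.Int.floordiv (g * (i + 1)) n) := by omega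
  have h4 : (j + 1 ≤ PySem.Int.floordiv (g * (i + 1)) n) ↔ (j + 1) * n ≤ g * (i + 1) :=
    PySem.Int.le_floordiv_iff_mul_le hn
  rw [h1, h2, h3, h4]
  constructor
  · rintro ⟨a, b⟩
    constructor
    · intro hc; nlinarith
    · nlinarith
  · rintro ⟨a, b⟩
    constructor
    · nlinarith [lt_of_not_ge (fun hc => a hc)]
    · nlinarith

lemma slice_split (xs : List Int) (a b c : Int) (ha : 0 ≤ a) (hab : a ≤ b) (hbc : b ≤ c) :
    PySem.List.slice xs (some a) (some c)
      = PySem.List.slice xs (some a) (some b) ++ PySem.List.slice xs (some b) (some c) := by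
  rw [PySem.List.slice_toNat xs ha (by omega), PySem.List.slice_toNat xs ha (by omega),
      PySem.List.slice_toNat xs (by omega : (0:Int) ≤ b) (by omega)]
  have h1 : c.toNat - a.toNat = (b.toNat - a.toNat) + (c.toNat - b.toNat) := by omega
  rw [h1, List.take_add, List.drop_drop]
  have h2 : a.toNat + (b.toNat - a.toNat) = b.toNat := by omega
  rw [h2]

lemma flatten_chunks (xs : List Int) (m : Int) (hm : 0 < m) :
    ∀ (k : Nat) (a : Int), 0 ≤ a →
    ((PySem.List.pyRange a (a + (k : Int)) 1).map
        (fun j => PySem.List.slice xs (some (j * m)) (some ((j + 1) * m)))).flatten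
      = PySem.List.slice xs (some (a * m)) (some ((a + (k : Int)) * m)) := by
  intro k
  induction k with
  | zero =>
    intro a ha
    rw [show a + ((0:Nat):Int) = a by simp, PySem.List.pyRange_one_eq_nil le_rfl]
    rw [PySem.List.slice_toNat xs (by positivity) (by positivity)]
    simp
  | succ k ih =>
    intro a ha
    rw [PySem.List.pyRange_one_cons (by push_cast; omega : a < a + ((k+1:Nat):Int))]
    simp only [List.map_cons, List.flatten_cons]
    have h1 : a + ((k+1:Nat):Int) = (a + 1) + ((k:Nat):Int) := by push_cast; ring
    rw [h1, ih (a + 1) (by omega),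
        slice_split xs (a * m) ((a + 1) * m) ((a + 1 + (k:Int)) * m) (by positivity)
          (by nlinarith) (by nlinarith)]

lemma pvB_nonneg (g n j : Int) (hn : 0 < n) (hg : 0 < g) (hj : 0 ≤ j) : 0 ≤ pvB g n j := by
  unfold pvB
  rw [PySem.Int.le_floordiv_iff_mul_le hg]
  nlinarith

lemma pvB_mono (g n : Int) (_hn : 0 < n) (hg : 0 < g) {j j' : Int} (h : j ≤ j') :
    pvB g n j ≤ pvB g n j' := by
  unfold pvB
  rw [PySem.Int.le_floordiv_iff_mul_le hg]
  have h0 : PySem.Int.floordiv (n * (j + 1) - 1) g * g ≤ n * (j + 1) - 1 :=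
    (PySem.Int.le_floordiv_iff_mul_le hg).mp le_rfl
  nlinarith

lemma pvB_step (g n j : Int) (_hn : 0 < n) (hng : n ≤ g) (hg : 0 < g) :
    pvB g n j ≤ pvB g n (j - 1) + 1 := by
  have h0 : n * ((j - 1) + 1) - 1 < (pvB g n (j - 1) + 1) * g :=
    ((PySem.Int.floordiv_eq_iff_of_pos hg).mp rfl).2
  have h1 : pvB g n j < pvB g n (j - 1) + 2 := by
    unfold pvB
    rw [PySem.Int.floordiv_lt_iff_lt_mul hg]
    unfold pvB at h0
    nlinarith
  omega

-- the invariant of B's flush-on-change sweep, after j chunks (1 ≤ j ≤ g)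
lemma pvRegroup_inv (g n : Int) (hn : 0 < n) (hng : n ≤ g) (c : Int → List Int) :
    ∀ j : Int, 1 ≤ j → j ≤ g →
    (PySem.List.pyRange 0 j 1).foldl
      (fun st k =>
        if pvB g n k ≠ st.2.2 then (st.1 ++ [st.2.1], c k, pvB g n k)
        else (st.1, st.2.1 ++ c k, st.2.2))
      (([] : List (List Int)), ([] : List Int), (0 : Int))
    = ((PySem.List.pyRange 0 (pvB g n (j - 1)) 1).map (pvGrp g n c),
       ((PySem.List.pyRange (pvLo g n (pvB g n (j - 1))) j 1).map c).flatten,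
       pvB g n (j - 1)) := by
  have hg : 0 < g := lt_of_lt_of_le hn hng
  intro j hj1
  induction j, hj1 using Int.le_induction with
  | base =>
    intro _
    have hb0 : pvB g n 0 = 0 := by
      unfold pvB
      rw [PySem.Int.floordiv_eq_iff_of_pos hg]
      constructor <;> nlinarith
    have h01 : PySem.List.pyRange 0 1 1 = [0] := by
      rw [PySem.List.pyRange_one_cons (by omega : (0:Int) < 1),
          show (0:Int) + 1 = 1 by ring,
          PySem.List.pyRange_one_eq_nil (by omega : (1:Int) ≤ 1)]
    rw [h01]
    simp only [List.foldl_cons, List.foldl_nil, hb0, show (1:Int) - 1 = 0 by ring]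
    rw [if_neg (by simp), pvLo_zero g n hn,
        PySem.List.pyRange_one_eq_nil (by omega : (0:Int) ≤ 0), h01]
    simp
  | succ j hj1 ih =>
    intro hj1g
    have hjg : j ≤ g := by omega
    have H := ih hjg
    rw [PySem.List.pyRange_one_succ_right (by omega : (0:Int) ≤ j), List.foldl_append,
        List.foldl_cons, List.foldl_nil, H]
    set i0 := pvB g n (j - 1) with hi0
    set i1 := pvB g n j with hi1
    have hch0 := (pvB_eq_iff g n i0 (j - 1) hn hg).mp rfl
    have hch1 := (pvB_eq_iff g n i1 j hn hg).mp rfl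
    have hmono : i0 ≤ i1 := pvB_mono g n hn hg (by omega)
    have hstep : i1 ≤ i0 + 1 := pvB_step g n j hn hng hg
    have hsucc : j + 1 - 1 = j := by ring
    rw [hsucc, ← hi1]
    dsimp only
    rcases (by omega : i1 = i0 ∨ i1 = i0 + 1) with hcase | hcase
    · rw [hcase, if_neg (by simp)]
      have hlo_le : pvLo g n i0 ≤ j := by rw [← hcase]; exact hch1.1
      rw [PySem.List.pyRange_one_succ_right hlo_le, List.map_append, List.flatten_append]
      simp
    · rw [if_pos (by omega)]
      have hjlo : j = pvLo g n i1 := by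
        have h1 : j - 1 < pvLo g n (i0 + 1) := hch0.2
        have h2 : pvLo g n i1 ≤ j := hch1.1
        rw [← hcase] at h1
        omega
      have hi0nn : 0 ≤ i0 := pvB_nonneg g n (j - 1) hn hg (by omega)
      have hrange : PySem.List.pyRange 0 i1 1 = PySem.List.pyRange 0 i0 1 ++ [i0] := by
        have h := PySem.List.pyRange_one_succ_right (a := 0) (b := i0) hi0nn
        rw [← hcase] at h
        exact h
      simp only [Prod.mk.injEq]
      refine ⟨?_, ?_, trivial⟩
      · rw [hrange, List.map_append]
        simp only [List.map_cons, List.map_nil, List.append_cancel_left_eq]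
        unfold pvGrp
        rw [← hcase, ← hjlo]
      · rw [← hjlo, PySem.List.pyRange_one_singleton]
        simp

-- B's _regroup on the chunk list [c 0, …, c (g-1)] is exactly the list of the n groups
lemma pvRegroup_eq_map (g n : Int) (hn : 0 < n) (hng : n ≤ g) (c : Int → List Int) :
    pvRegroup ((PySem.List.pyRange 0 g 1).map c) n
      = (PySem.List.pyRange 0 n 1).map (pvGrp g n c) := by
  have hg : 0 < g := lt_of_lt_of_le hn hng
  have hlen' : (((PySem.List.pyRange 0 g 1).map c).length : Int) = g := by
    simp [PySem.List.length_pyRange_one]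
    omega
  simp only [pvRegroup, PySem.List.enumerate_eq_map_pyRange (d := ([] : List Int)),
             List.foldl_map, PySem.List.len_eq, hlen']
  have hfold := PySem.List.foldl_congr_mem
      (l := PySem.List.pyRange 0 g 1)
      (init := (([] : List (List Int)), ([] : List Int), (0 : Int)))
      (f := fun (x : List (List Int) × List Int × Int) (y : Int) =>
        if PySem.Int.floordiv (n * (y + 1) - 1) g ≠ x.2.2 then
          (x.1 ++ [x.2.1], PySem.List.pyGetD (List.map c (PySem.List.pyRange 0 g 1)) y ([] : List Int),
            PySem.Int.floordiv (n * (y + 1) - 1) g)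
        else (x.1, x.2.1 ++ PySem.List.pyGetD (List.map c (PySem.List.pyRange 0 g 1)) y ([] : List Int), x.2.2))
      (g := fun st k =>
        if pvB g n k ≠ st.2.2 then (st.1 ++ [st.2.1], c k, pvB g n k)
        else (st.1, st.2.1 ++ c k, st.2.2))
      (by
        intro acc x hx
        dsimp only
        have hxr := (PySem.List.mem_pyRange_one).mp hx
        rw [PySem.List.pyGetD_map_pyRange_of_nonneg c g x ([] : List Int) hxr.1 hxr.2]
        rfl)
  rw [hfold, pvRegroup_inv g n hn hng c g (by omega) le_rfl]
  have hbg : pvB g n (g - 1) = n - 1 := by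
    rw [pvB_eq_iff g n (n - 1) (g - 1) hn hg]
    have htop : pvLo g n (n - 1 + 1) = g := by
      rw [show n - 1 + 1 = n by ring, pvLo_top g n hn]
    constructor
    · have hlt : pvLo g n (n - 1) < g := by
        unfold pvLo
        rw [PySem.Int.floordiv_lt_iff_lt_mul hn]
        nlinarith
      omega
    · omega
  rw [hbg]
  have hrange : PySem.List.pyRange 0 n 1 = PySem.List.pyRange 0 (n - 1) 1 ++ [n - 1] := by
    have h := PySem.List.pyRange_one_succ_right (a := 0) (b := n - 1) (by omega)
    rw [show n - 1 + 1 = n by ring] at h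
    exact h
  rw [hrange, List.map_append]
  simp only [List.map_cons, List.map_nil, List.append_cancel_left_eq]
  unfold pvGrp
  rw [show n - 1 + 1 = n by ring, pvLo_top g n hn]

-- B's group i, for uniform chunks of size m, is exactly A's stretched slice
lemma pvGrp_slice (xs : List Int) (m g n i : Int) (hm : 0 < m) (hn : 0 < n) (hg : 0 ≤ g) (hi : 0 ≤ i) :
    pvGrp g n (fun j => PySem.List.slice xs (some (j * m)) (some ((j + 1) * m))) i
      = PySem.List.slice xs (some (pvLo g n i * m)) (some (pvLo g n (i + 1) * m)) := by
  unfold pvGrp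
  have ha : 0 ≤ pvLo g n i := pvLo_nonneg g n i hn hg hi
  have hab : pvLo g n i ≤ pvLo g n (i + 1) := pvLo_mono g n hn hg (by omega)
  have hb : pvLo g n (i + 1) = pvLo g n i + ((pvLo g n (i + 1) - pvLo g n i).toNat : Int) := by omega
  rw [hb]
  exact flatten_chunks xs m hm (pvLo g n (i + 1) - pvLo g n i).toNat (pvLo g n i) ha

-- A's inner loop: a fold appending one pair to each of two independent accumulators
lemma a_inner (f1 f2 : Int → String × List Int) (r : List Int)
    (acc : List (String × List Int) × List (String × List Int)) :
    r.foldl (fun q i => (q.1 ++ [f1 i], q.2 ++ [f2 i])) acc = (acc.1 ++ r.map f1, acc.2 ++ r.map f2) := by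
  obtain ⟨a1, a2⟩ := acc
  rw [PySem.List.foldl_prod_mk (f := fun s e => s ++ [f1 e]) (g := fun s e => s ++ [f2 e]),
      PySem.List.foldl_append_singleton_eq_map, PySem.List.foldl_append_singleton_eq_map]

-- B's inner loop over the enumerated zip of the two regrouped lists, in closed form
lemma alt_inner (w : Nat) (k0 : Int) (F H : Int → List Int) (n : Int) (hn : 0 < n)
    (acc : List (String × List Int) × List (String × List Int)) :
    (PySem.List.enumerate (((PySem.List.pyRange 0 n 1).map F).zip ((PySem.List.pyRange 0 n 1).map H))).foldl
      (fun q ip => (q.1 ++ [(mkKey w k0 ip.1, ip.2.1)], q.2 ++ [(mkKey w k0 ip.1, ip.2.2)])) acc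
    = (acc.1 ++ (PySem.List.pyRange 0 n 1).map (fun i => (mkKey w k0 i, F i)),
       acc.2 ++ (PySem.List.pyRange 0 n 1).map (fun i => (mkKey w k0 i, H i))) := by
  have hlen' : (((PySem.List.pyRange 0 n 1).map (fun a => (F a, H a))).length : Int) = n := by
    simp [PySem.List.length_pyRange_one]
    omega
  rw [List.zip_map']
  simp only [PySem.List.enumerate_eq_map_pyRange (d := (([] : List Int), ([] : List Int))),
             List.foldl_map, PySem.List.len_eq, hlen']
  have hfold := PySem.List.foldl_congr_mem
      (l := PySem.List.pyRange 0 n 1) (init := acc)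
      (f := fun (q : List (String × List Int) × List (String × List Int)) (y : Int) =>
        (q.1 ++ [(mkKey w k0 (y, PySem.List.pyGetD ((PySem.List.pyRange 0 n 1).map (fun a => (F a, H a))) y (([] : List Int), ([] : List Int))).1,
                   (y, PySem.List.pyGetD ((PySem.List.pyRange 0 n 1).map (fun a => (F a, H a))) y (([] : List Int), ([] : List Int))).2.1)],
         q.2 ++ [(mkKey w k0 (y, PySem.List.pyGetD ((PySem.List.pyRange 0 n 1).map (fun a => (F a, H a))) y (([] : List Int), ([] : List Int))).1,
                   (y, PySem.List.pyGetD ((PySem.List.pyRange 0 n 1).map (fun a => (F a, H a))) y (([] : List Int), ([] : List Int))).2.2)]))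
      (g := fun q i => (q.1 ++ [(mkKey w k0 i, F i)], q.2 ++ [(mkKey w k0 i, H i)]))
      (by
        intro q x hx
        dsimp only
        have hxr := (PySem.List.mem_pyRange_one).mp hx
        rw [PySem.List.pyGetD_map_pyRange_of_nonneg (fun a => (F a, H a)) n x _ hxr.1 hxr.2])
  rw [hfold, a_inner]

theorem get_user_split_spec : Claim_equal_get_user_split := by
  intro tv te _hdom hpre
  unfold Spec_get_user_split get_user_split get_user_split_alt
  apply PySem.List.foldl_congr_mem
  intro acc p hp
  have hk : p.1.1 = p.2.1 := hpre.2.1 p hp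
  dsimp only
  have e79 : ((p.1.2.length : Int) + 79) = ((p.1.2.length : Int) + 80 - 1) := by ring
  have e15 : ((p.2.2.length : Int) + 15) = ((p.2.2.length : Int) + 16 - 1) := by ring
  rw [e79, e15]
  set gtv := PySem.Int.floordiv ((p.1.2.length : Int) + 80 - 1) 80 with hgtv
  set gte := PySem.Int.floordiv ((p.2.2.length : Int) + 16 - 1) 16 with hgte
  have hgtv0 : 0 ≤ gtv := by
    rw [hgtv, PySem.Int.le_floordiv_iff_mul_le (by omega : (0:Int) < 80)]
    omega
  have hgte0 : 0 ≤ gte := by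
    rw [hgte, PySem.Int.le_floordiv_iff_mul_le (by omega : (0:Int) < 16)]
    omega
  by_cases hzero : min gtv gte = 0
  · rw [if_neg (show ¬ (min gtv gte ≠ 0) from fun h => h hzero)]
    by_cases hgt : gtv > gte
    · have h0 : gte = 0 := by rw [min_eq_right (by omega : gte ≤ gtv)] at hzero; exact hzero
      rw [if_pos hgt, h0, PySem.List.pyRange_one_eq_nil (by omega : (0:Int) ≤ 0), List.foldl_nil]
    · have h0 : gtv = 0 := by rw [min_eq_left (by omega : gtv ≤ gte)] at hzero; exact hzero
      rw [if_neg hgt, h0, PySem.List.pyRange_one_eq_nil (by omega : (0:Int) ≤ 0), List.foldl_nil]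
  · by_cases hgt : gtv > gte
    · have hmin : min gtv gte = gte := min_eq_right (by omega : gte ≤ gtv)
      have hn' : 0 < gte := by rw [hmin] at hzero; omega
      rw [if_pos hgt, hmin, if_pos (show gte ≠ 0 by omega),
          pvRegroup_eq_map gtv gte hn' (le_of_lt hgt) _,
          pvRegroup_eq_map gte gte hn' le_rfl _,
          alt_inner _ _ _ _ _ hn', a_inner]
      simp only [Prod.mk.injEq, List.append_cancel_left_eq]
      constructor
      · apply List.map_congr_left
        intro i hi
        have hir := (PySem.List.mem_pyRange_one).mp hi
        rw [pvGrp_slice p.1.2 80 gtv gte i (by omega) hn' hgtv0 hir.1]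
        unfold pvLo
        rfl
      · apply List.map_congr_left
        intro i hi
        have hir := (PySem.List.mem_pyRange_one).mp hi
        rw [pvGrp_slice p.2.2 16 gte gte i (by omega) hn' hgte0 hir.1]
        unfold pvLo
        rw [floordiv_mul_self gte i hn' hir.1,
            floordiv_mul_self gte (i + 1) hn' (by omega), hk]
    · have hmin : min gtv gte = gtv := min_eq_left (by omega : gtv ≤ gte)
      have hn' : 0 < gtv := by rw [hmin] at hzero; omega
      rw [if_neg hgt, hmin, if_pos (show gtv ≠ 0 by omega),
          pvRegroup_eq_map gtv gtv hn' le_rfl _,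
          pvRegroup_eq_map gte gtv hn' (by omega : gtv ≤ gte) _,
          alt_inner _ _ _ _ _ hn', a_inner]
      simp only [Prod.mk.injEq, List.append_cancel_left_eq]
      constructor
      · apply List.map_congr_left
        intro i hi
        have hir := (PySem.List.mem_pyRange_one).mp hi
        rw [pvGrp_slice p.1.2 80 gtv gtv i (by omega) hn' hgtv0 hir.1]
        unfold pvLo
        rw [floordiv_mul_self gtv i hn' hir.1,
            floordiv_mul_self gtv (i + 1) hn' (by omega), hk]
      · apply List.map_congr_left
        intro i hi
        have hir := (PySem.List.mem_pyRange_one).mp hi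
        rw [pvGrp_slice p.2.2 16 gte gtv i (by omega) hn' hgte0 hir.1]
        unfold pvLo
        rfl
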